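-- pv_equiv track=rewrite | github.com/heyitskevin/adventofcode | 2023/day_10/2.py | purge_maze
-- ===== SOURCE A (Python) =====
-- INVALID_CHARACTER ='0'
--
-- def purge_maze(cleaned_maze):
--     new_maze = []
--     # Make outer bounds
--     for row in cleaned_maze:
--         if not all([r == INVALID_CHARACTER for r in row]):
--             new_maze.append(row)
--
--     boundary_by_row = {
--         ix: [] for ix , r in enumerate(new_maze)
--     }
--
--     for rix, row in enumerate(new_maze):
--         l_clean = clean_row(row)
--         r_clean = clean_row(row[::-1])
--         r_clean = [(len(row) - x[1], len(row) - x[0]) for x in r_clean]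
--         boundary_by_row[rix] += l_clean + r_clean
--
--     for ixr, row in enumerate(new_maze):
--         inelligible_indexes = boundary_by_row[ixr]
--         new_maze[ixr] = [' ' if any([ixc in range(*tup) for tup in inelligible_indexes]) else elem for ixc, elem in enumerate(row)]
--
--     # pretty_print_maze(new_maze)
--     return new_maze
--
-- def clean_row(row): # Used for printng
--     clean_ixes = []
--     ix = 0
--     base_ix = 0
--     bound_encountered = False
--     while not bound_encountered:
--         if ix > len(row) - 1:
--             clean_ixes.append((base_ix, ix))
--             break
--         elem = row[ix]
--         if elem != INVALID_CHARACTER: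
--             bound_encountered = True
--             clean_ixes.append((base_ix, ix))
--         ix += 1
--     return clean_ixes
-- ===== SOURCE B (Python) =====
-- INVALID_CHARACTER = '0'
--
-- def purge_maze(cleaned_maze):
--     # Simpler: keep rows having a valid cell; blank only the leading and trailing '0'-runs directly.
--     new_maze = []
--     for row in cleaned_maze:
--         if any(c != INVALID_CHARACTER for c in row):
--             n = len(row)
--             l = next(i for i, c in enumerate(row) if c != INVALID_CHARACTER)
--             r = n - next(i for i, c in enumerate(row[::-1]) if c != INVALID_CHARACTER)
--             new_maze.append([' '] * l + row[l:r] + [' '] * (n - r))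
--     return new_maze
-- ===== Notes on version B (the rewrite author's own statement) =====
-- stated objective: simpler
-- what changed: One pass per row: keep rows with any valid cell, find the leading and trailing '0'-run lengths directly and rebuild the row as blanks+slice+blanks, dropping the clean_row helper's boundary tuples, the index-keyed dict and the per-cell range-membership test.
import Mathlib
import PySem

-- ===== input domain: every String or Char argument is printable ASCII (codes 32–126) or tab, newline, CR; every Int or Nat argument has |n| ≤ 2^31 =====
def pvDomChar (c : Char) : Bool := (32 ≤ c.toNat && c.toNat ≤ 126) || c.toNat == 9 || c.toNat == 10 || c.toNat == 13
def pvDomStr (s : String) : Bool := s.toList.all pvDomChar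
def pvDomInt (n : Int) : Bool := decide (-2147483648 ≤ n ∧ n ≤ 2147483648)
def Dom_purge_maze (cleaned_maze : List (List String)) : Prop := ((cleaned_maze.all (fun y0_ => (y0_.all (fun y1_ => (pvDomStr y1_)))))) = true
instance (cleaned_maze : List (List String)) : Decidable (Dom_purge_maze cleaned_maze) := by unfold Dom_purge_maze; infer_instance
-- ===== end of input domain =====

-- B blanks the leading/trailing '0'-runs directly (simpler decomposition); A and B agree on every input.

-- ===== PORT A =====
-- clean_row's while loop, transliterated as recursion over the remaining suffix with the running index ix
-- (base_ix is always 0); 'ix > len(row)-1' is exactly 'suffix exhausted'.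
def clean_row_go : List String → Int → List (Int × Int)
  | [], ix => [(0, ix)]
  | e :: rest, ix => if e ≠ "0" then [(0, ix)] else clean_row_go rest (ix + 1)

def clean_row (row : List String) : List (Int × Int) := clean_row_go row 0

def purge_maze (cleaned_maze : List (List String)) : List (List String) :=
  let new_maze := cleaned_maze.foldl
    (fun acc row => if !(row.all (fun r => r == "0")) then acc ++ [row] else acc) []
  -- {ix: [] for ix, r in enumerate(new_maze)}
  let boundary0 : PySem.Dict Int (List (Int × Int)) :=
    (PySem.List.enumerate new_maze 0).foldl (fun d p => d.insert p.1 []) PySem.Dict.empty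
  -- boundary_by_row[rix] += l_clean + r_clean
  let boundary := (PySem.List.enumerate new_maze 0).foldl
    (fun d p =>
      let l_clean := clean_row p.2
      let r_clean := (clean_row p.2.reverse).map
        (fun x => ((p.2.length : Int) - x.2, (p.2.length : Int) - x.1))
      d.insert p.1 (d.getD p.1 [] ++ (l_clean ++ r_clean))) boundary0
  -- third loop: new_maze[ixr] is rewritten from the row fetched at that index, each index once, so it is a map;
  -- 'ixc in range(*tup)' is step-1 range membership, exactly tup.1 ≤ ixc < tup.2.
  (PySem.List.enumerate new_maze 0).map
    (fun q =>
      let inelligible := boundary.getD q.1 []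
      (PySem.List.enumerate q.2 0).map
        (fun pc => if inelligible.any (fun tup => decide (tup.1 ≤ pc.1 ∧ pc.1 < tup.2)) then " " else pc.2))

-- ===== PORT B =====
-- next(i for i, c in enumerate(row) if c != '0'); returns the length when no such cell (guarded by any in B).
def first_non_invalid : List String → Nat
  | [] => 0
  | c :: rest => if c ≠ "0" then 0 else first_non_invalid rest + 1

def purge_maze_alt (cleaned_maze : List (List String)) : List (List String) :=
  cleaned_maze.foldl
    (fun out row =>
      if row.any (fun c => c ≠ "0") then
        let n := row.length
        let l := first_non_invalid row
        let r := n - first_non_invalid row.reverse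
        out ++ [List.replicate l " " ++ PySem.List.slice row (some (l : Int)) (some (r : Int))
                ++ List.replicate (n - r) " "]
      else out) []

-- ===== PRECONDITION & SPEC =====
def Spec_purge_maze (cleaned_maze : List (List String)) (out : List (List String)) : Prop := out = purge_maze_alt cleaned_maze
instance (cleaned_maze : List (List String)) (out : List (List String)) : Decidable (Spec_purge_maze cleaned_maze out) := by unfold Spec_purge_maze; infer_instance

-- ===== CLAIM (what is proved, stated in full; the proofs are below) =====
def Claim_equal_purge_maze : Prop := ∀ (cleaned_maze : List (List String)), Dom_purge_maze cleaned_maze → Spec_purge_maze cleaned_maze (purge_maze cleaned_maze)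

-- ===== LEMMAS AND PROOFS =====

-- the per-row boundary list A attaches to each kept row
def bnds (row : List String) : List (Int × Int) :=
  clean_row row ++ (clean_row row.reverse).map
    (fun x => ((row.length : Int) - x.2, (row.length : Int) - x.1))

lemma clean_row_go_eq (row : List String) (ix : Int) :
    clean_row_go row ix = [(0, ix + (first_non_invalid row : Int))] := by
  induction row generalizing ix with
  | nil => simp [clean_row_go, first_non_invalid]
  | cons c rest ih =>
    by_cases h : c = "0"
    · simp [clean_row_go, first_non_invalid, h, ih]; ring
    · simp [clean_row_go, first_non_invalid, h]

lemma fni_lt {row : List String} (h : row.any (fun c => c ≠ "0") = true) :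
    first_non_invalid row < row.length := by
  induction row with
  | nil => simp at h
  | cons c rest ih =>
    by_cases hc : c = "0"
    · simp [hc] at h
      simpa [first_non_invalid, hc] using ih (by simpa using h)
    · simp [first_non_invalid, hc]

lemma fni_get {row : List String} (h : row.any (fun c => c ≠ "0") = true) :
    row[first_non_invalid row]? ≠ some "0" := by
  induction row with
  | nil => simp at h
  | cons c rest ih =>
    by_cases hc : c = "0"
    · have h' : rest.any (fun c => c ≠ "0") = true := by simpa [hc] using h
      simpa [first_non_invalid, hc] using ih h'
    · simp [first_non_invalid, hc]

lemma fni_before {row : List String} {j : Nat} (hj : j < first_non_invalid row)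
    (hj2 : j < row.length) : row[j]? = some "0" := by
  induction row generalizing j with
  | nil => simp at hj2
  | cons c rest ih =>
    by_cases hc : c = "0"
    · cases j with
      | zero => simp [hc]
      | succ j' =>
        have e : first_non_invalid (c :: rest) = first_non_invalid rest + 1 := by
          simp [first_non_invalid, hc]
        rw [e] at hj
        simpa using ih (by omega) (by simpa using hj2)
    · rw [show first_non_invalid (c :: rest) = 0 from by simp [first_non_invalid, hc]] at hj
      omega

-- l + k ≤ n for a row with a valid cell
lemma fni_add_le {row : List String} (h : row.any (fun c => c ≠ "0") = true) :
    first_non_invalid row + first_non_invalid row.reverse ≤ row.length := by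
  set l := first_non_invalid row with hl
  set k := first_non_invalid row.reverse with hk
  have hrev : row.reverse.any (fun c => c ≠ "0") = true := by simpa using h
  have hln : l < row.length := fni_lt h
  have hkn : k < row.length := by simpa using fni_lt hrev
  by_contra hcon
  push_neg at hcon
  have hjlt : row.length - 1 - l < k := by omega
  have h0 : row.reverse[row.length - 1 - l]? = some "0" :=
    fni_before (row := row.reverse) hjlt (by simp; omega)
  rw [List.getElem?_reverse (by omega)] at h0
  have e : row.length - 1 - (row.length - 1 - l) = l := by omega
  rw [e] at h0
  exact fni_get h h0

-- A's dict of boundaries: keys strictly below the enumeration start are untouched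
lemma dict_fold_lt (ms : List (List String)) (s : Int)
    (d : PySem.Dict Int (List (Int × Int))) (k : Int) (hk : k < s) :
    (((PySem.List.enumerate ms s).foldl
      (fun d p => d.insert p.1 (d.getD p.1 [] ++ bnds p.2)) d)).getD k []
    = d.getD k [] := by
  induction ms generalizing s d with
  | nil => simp [PySem.List.enumerate_nil]
  | cons a rest ih =>
    rw [PySem.List.enumerate_cons, List.foldl_cons, ih (s+1) _ (by omega)]
    rw [PySem.Dict.getD_insert]
    simp [show ¬ (k = s) by omega]

lemma dict_fold_getD (ms : List (List String)) (s : Int)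
    (d : PySem.Dict Int (List (Int × Int))) (k : Nat) (hk : k < ms.length) :
    (((PySem.List.enumerate ms s).foldl
      (fun d p => d.insert p.1 (d.getD p.1 [] ++ bnds p.2)) d)).getD (s + k) []
    = d.getD (s + k) [] ++ bnds (ms[k]'hk) := by
  induction ms generalizing s d k with
  | nil => simp at hk
  | cons a rest ih =>
    rw [PySem.List.enumerate_cons, List.foldl_cons]
    cases k with
    | zero =>
      simp only [Nat.cast_zero, add_zero]
      rw [dict_fold_lt rest (s+1) _ s (by omega)]
      simp
    | succ k' =>
      have e : s + ((k' + 1 : Nat) : Int) = (s + 1) + (k' : Int) := by push_cast; ring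
      rw [e, ih (s+1) _ k' (by simpa using hk)]
      rw [PySem.Dict.getD_insert]
      simp [show ¬ ((s + 1) + (k' : Int) = s) by omega]

lemma dict0_getD (ms : List (List String)) (s : Int)
    (d : PySem.Dict Int (List (Int × Int))) (hd : ∀ k, d.getD k [] = []) (k : Int) :
    ((PySem.List.enumerate ms s).foldl (fun d p => d.insert p.1 []) d).getD k [] = [] := by
  induction ms generalizing s d with
  | nil => simpa [PySem.List.enumerate_nil] using hd k
  | cons a rest ih =>
    rw [PySem.List.enumerate_cons, List.foldl_cons]
    refine ih (s+1) _ (fun k' => ?_)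
    rw [PySem.Dict.getD_insert]
    split <;> simp [hd]

-- the per-row bnds, in closed form
lemma bnds_eq (row : List String) :
    bnds row = [(0, (first_non_invalid row : Int)),
      ((row.length : Int) - (first_non_invalid row.reverse : Int), (row.length : Int))] := by
  simp [bnds, clean_row, clean_row_go_eq]

-- the per-row equality: A's enumerate-map with bnds equals B's blanks+slice+blanks
lemma row_eq (row : List String) (h : row.any (fun c => c ≠ "0") = true) :
    (PySem.List.enumerate row 0).map
      (fun pc => if (bnds row).any (fun tup => decide (tup.1 ≤ pc.1 ∧ pc.1 < tup.2)) then " " else pc.2)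
    = List.replicate (first_non_invalid row) " "
      ++ PySem.List.slice row (some ((first_non_invalid row : Nat) : Int))
           (some ((row.length - first_non_invalid row.reverse : Nat) : Int))
      ++ List.replicate (row.length - (row.length - first_non_invalid row.reverse)) " " := by
  set n := row.length with hn
  set l := first_non_invalid row with hl
  set k := first_non_invalid row.reverse with hk
  have hln : l < n := fni_lt h
  have hkn : k < n := by
    simpa [← hn] using fni_lt (row := row.reverse) (by simpa using h)
  have hlk : l + k ≤ n := by simpa [← hn] using fni_add_le h
  rw [PySem.List.slice_natCast, bnds_eq row]
  simp only [← hn, ← hl, ← hk]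
  apply List.ext_getElem
  · simp [PySem.List.length_enumerate, ← hn]
    omega
  · intro i h1 h2
    have h1' : i < n := by
      simpa [PySem.List.length_enumerate, ← hn] using h1
    rw [List.getElem_map, PySem.List.getElem_enumerate]
    simp only [List.any_cons, List.any_nil, Bool.or_false, Bool.or_eq_true, decide_eq_true_eq]
    by_cases hi1 : i < l
    · rw [if_pos (by left; constructor <;> omega)]
      rw [List.getElem_append_left (by simp; omega)]
      rw [List.getElem_append_left (by simp; omega)]
      rw [List.getElem_replicate]
    · by_cases hi2 : i < n - k
      · rw [if_neg (by omega)]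
        rw [List.getElem_append_left (by simp; omega)]
        rw [List.getElem_append_right (by simp; omega)]
        simp only [List.getElem_take, List.getElem_drop]
        simp [show l + (i - l) = i from by omega]
      · rw [if_pos (by right; constructor <;> omega)]
        rw [List.getElem_append_right (by simp; omega)]
        rw [List.getElem_replicate]

-- the B-side row builder, named for the proof
def Brow (row : List String) : List String :=
  List.replicate (first_non_invalid row) " "
  ++ PySem.List.slice row (some ((first_non_invalid row : Nat) : Int))
       (some ((row.length - first_non_invalid row.reverse : Nat) : Int))
  ++ List.replicate (row.length - (row.length - first_non_invalid row.reverse)) " "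

lemma pq (row : List String) :
    (row.any fun c => decide (c ≠ "0")) = !(row.all fun r => r == "0") := by
  induction row with
  | nil => simp
  | cons c rest ih =>
    by_cases hc : c = "0"
    · simpa [hc] using ih
    · simp [hc]

lemma alt_eq (cleaned : List (List String)) :
    purge_maze_alt cleaned
    = (cleaned.filter (fun row => row.any fun c => decide (c ≠ "0"))).map Brow := by
  simp only [purge_maze_alt]
  rw [PySem.List.foldl_append_if]
  simp [Brow]

lemma lambda_eq : (fun (d : PySem.Dict Int (List (Int × Int))) (p : Int × List String) =>
    d.insert p.1 (d.getD p.1 [] ++ (clean_row p.2 ++ (clean_row p.2.reverse).map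
      (fun x => ((p.2.length : Int) - x.2, (p.2.length : Int) - x.1)))))
  = (fun d p => d.insert p.1 (d.getD p.1 [] ++ bnds p.2)) := rfl

lemma boundary_getD (ms : List (List String)) (k : Nat) (hk : k < ms.length) :
    ((PySem.List.enumerate ms 0).foldl
      (fun d p => d.insert p.1 (d.getD p.1 [] ++ bnds p.2))
      ((PySem.List.enumerate ms 0).foldl (fun d p => d.insert p.1 []) PySem.Dict.empty)).getD (k : Int) []
    = bnds (ms[k]'hk) := by
  have h0 : ∀ j : Int,
      ((PySem.List.enumerate ms 0).foldl (fun d p => d.insert p.1 []) PySem.Dict.empty).getD j [] = [] :=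
    fun j => dict0_getD ms 0 _ (fun k' => by simp) j
  have h := dict_fold_getD ms 0
    ((PySem.List.enumerate ms 0).foldl (fun d p => d.insert p.1 []) PySem.Dict.empty) k hk
  rw [h0] at h
  simpa using h

-- ===== VERDICT (by name: the statement is the Claim_ definition above) =====
theorem purge_maze_spec : Claim_equal_purge_maze := by
  intro cleaned _
  unfold Spec_purge_maze
  rw [alt_eq]
  simp only [purge_maze]
  rw [PySem.List.foldl_append_if_eq_filter]
  simp only [List.nil_append]
  rw [show cleaned.filter (fun row => row.any fun c => decide (c ≠ "0"))
      = cleaned.filter (fun row => !(row.all fun r => r == "0")) from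
    List.filter_congr (fun row _ => pq row)]
  rw [lambda_eq]
  apply List.ext_getElem
  · simp [PySem.List.length_enumerate]
  · intro j hj1 hj2
    have hjlen : j < (cleaned.filter (fun row => !(row.all fun r => r == "0"))).length := by
      simpa [PySem.List.length_enumerate] using hj1
    simp only [List.getElem_map, PySem.List.getElem_enumerate, zero_add]
    rw [boundary_getD (cleaned.filter (fun row => !(row.all fun r => r == "0"))) j hjlen]
    have hrow : ((cleaned.filter (fun row => !(row.all fun r => r == "0")))[j]'hjlen).any
        (fun c => decide (c ≠ "0")) = true := by
      rw [pq]
      exact (List.mem_filter.mp (List.getElem_mem hjlen)).2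
    simpa [Brow] using row_eq _ hrow
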